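-- pv_equiv track=rewrite | github.com/polius/advent-of-code | 2025/2/part2.py | check
-- ===== SOURCE A (Python) =====
-- def check(text, num_parts):
--     # Get the size of each part and remainder
--     div, mod = divmod(len(text), num_parts)
--
--     # If it doesn't divide evenly, it's valid
--     if mod != 0:
--         return True
--
--     # Split the text into parts
--     parts = []
--     for i in range(div):
--         start = i * num_parts
--         end = start + num_parts
--         parts.append(text[start:end])
--
--     # Return if the text is valid
--     return len(set(parts)) != 1 or parts[0] == text
-- ===== SOURCE B (Python) =====
-- def check(text, num_parts):
--     div, mod = divmod(len(text), num_parts)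
--     # Not evenly divisible, or at most one block: valid.
--     if mod != 0 or div <= 1:
--         return True
--     # Valid iff the text is NOT just the first block repeated.
--     return text != text[:num_parts] * div
-- ===== Notes on version B (the rewrite author's own statement) =====
-- stated objective: simpler
-- what changed: Instead of building the list of all blocks and taking a set of them, B builds the expected fully-repeated string once (first block times div) and compares it to the text, with an early True when the length does not divide evenly or there is at most one block.
import Mathlib
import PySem

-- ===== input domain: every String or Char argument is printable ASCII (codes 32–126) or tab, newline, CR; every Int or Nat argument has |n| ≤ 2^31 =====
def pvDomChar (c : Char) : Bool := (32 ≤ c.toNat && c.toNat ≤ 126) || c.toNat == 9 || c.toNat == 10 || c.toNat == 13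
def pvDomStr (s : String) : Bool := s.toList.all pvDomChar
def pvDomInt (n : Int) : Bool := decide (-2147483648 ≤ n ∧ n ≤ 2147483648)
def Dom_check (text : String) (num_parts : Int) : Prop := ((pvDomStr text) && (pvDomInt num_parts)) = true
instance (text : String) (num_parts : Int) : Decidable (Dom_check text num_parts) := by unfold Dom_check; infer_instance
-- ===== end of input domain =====

-- B is simpler: instead of collecting all blocks and a set of them, it compares the text
-- against the first block repeated div times (with an early True when mod ≠ 0 or div ≤ 1).

-- ===== PORT A =====
def check (text : String) (num_parts : Int) : Bool :=
  match PySem.Int.divmod? (PySem.Str.len text) num_parts with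
  | none => false   -- ZeroDivisionError; excluded by Pre_check
  | some (dv, md) =>
    if md ≠ 0 then true
    else
      let parts : List (List Char) :=
        (PySem.List.pyRange 0 dv 1).foldl (fun acc i =>
          acc ++ [PySem.List.slice text.toList (some (i * num_parts)) (some (i * num_parts + num_parts))]) []
      decide ((PySem.Set.ofList parts).length ≠ 1) || decide (PySem.List.pyGetD parts 0 [] = text.toList)

-- ===== PORT B =====
def check_alt (text : String) (num_parts : Int) : Bool :=
  match PySem.Int.divmod? (PySem.Str.len text) num_parts with
  | none => false   -- ZeroDivisionError; excluded by Pre_check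
  | some (dv, md) =>
    if md ≠ 0 ∨ dv ≤ 1 then true
    else decide (text.toList ≠ (List.replicate dv.toNat (PySem.List.slice text.toList none (some num_parts))).flatten)

-- ===== PRECONDITION & SPEC =====
-- Pre_ excludes only num_parts = 0, where both A and B raise ZeroDivisionError at divmod.
def Pre_check (text : String) (num_parts : Int) : Prop := num_parts ≠ 0
instance (text : String) (num_parts : Int) : Decidable (Pre_check text num_parts) := by
  unfold Pre_check; infer_instance
def pvWitness_check : String × Int := ("abab", 2)

def Spec_check (text : String) (num_parts : Int) (out : Bool) : Prop := out = check_alt text num_parts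
instance (text : String) (num_parts : Int) (out : Bool) : Decidable (Spec_check text num_parts out) := by unfold Spec_check; infer_instance

-- ===== CLAIM (what is proved, stated in full; the proofs are below) =====
def Claim_equal_check : Prop := ∀ (text : String) (num_parts : Int), Dom_check text num_parts → Pre_check text num_parts → Spec_check text num_parts (check text num_parts)

-- ===== LEMMAS AND PROOFS =====

-- A nodup list whose elements all equal b, containing b, is [b].
lemma nodup_all_eq {α : Type} (l : List α) (b : α) (hnd : l.Nodup) (hall : ∀ x ∈ l, x = b)
    (hb : b ∈ l) : l = [b] := by
  cases l with
  | nil => simp at hb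
  | cons x t =>
    have hx : x = b := hall x (by simp)
    have ht : t = [] := by
      rcases List.eq_nil_or_concat t with h | ⟨_, y, _⟩
      · exact h
      · exfalso
        have hy : ∀ y ∈ t, y = b := fun y hy => hall y (by simp [hy])
        cases t with
        | nil => simp at *
        | cons z u =>
          have hz : z = b := hy z (by simp)
          have : x ∉ z :: u := (List.nodup_cons.mp hnd).1
          exact this (by simp [hx, hz])
    simp [hx, ht]

-- len(set(xs)) == 1 iff every element equals a chosen member b.
lemma setlen_one_iff {α : Type} [BEq α] [LawfulBEq α] (xs : List α) (b : α) (hb : b ∈ xs) :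
    (PySem.Set.ofList xs).length = 1 ↔ ∀ x ∈ xs, x = b := by
  constructor
  · intro h1 x hx
    obtain ⟨a, ha⟩ := List.length_eq_one_iff.mp h1
    have hxa : x = a := by
      have : x ∈ PySem.Set.ofList xs := (PySem.Set.mem_ofList _ _).mpr hx
      rw [ha] at this; simpa using this
    have hba : b = a := by
      have : b ∈ PySem.Set.ofList xs := (PySem.Set.mem_ofList _ _).mpr hb
      rw [ha] at this; simpa using this
    rw [hxa, hba]
  · intro hall
    have hall' : ∀ x ∈ PySem.Set.ofList xs, x = b := fun x hx =>
      hall x ((PySem.Set.mem_ofList _ _).mp hx)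
    have hbmem : b ∈ PySem.Set.ofList xs := (PySem.Set.mem_ofList _ _).mpr hb
    rw [nodup_all_eq _ b (PySem.Set.nodup_ofList xs) hall' hbmem]
    rfl

-- A list of length d*n is the d-fold repetition of the n-block b
-- iff each of its d consecutive n-blocks equals b.
lemma chunks_rep (n : Nat) (hn : 0 < n) :
    ∀ (d : Nat) (l b : List Char), l.length = d * n → b.length = n →
      (l = (List.replicate d b).flatten ↔ ∀ k < d, (l.drop (k * n)).take n = b) := by
  intro d
  induction d with
  | zero =>
    intro l b hl _
    have : l = [] := List.eq_nil_of_length_eq_zero (by simpa using hl)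
    subst this
    simp
  | succ d ih =>
    intro l b hl hb
    have hlen : l.length = n + d * n := by rw [hl]; ring
    have hsplit : l = l.take n ++ l.drop n := (List.take_append_drop n l).symm
    have hlt : (l.take n).length = n := by
      rw [List.length_take]; omega
    have hld : (l.drop n).length = d * n := by
      rw [List.length_drop]; omega
    have hrep : (List.replicate (d + 1) b).flatten = b ++ (List.replicate d b).flatten := by
      rw [List.replicate_succ, List.flatten_cons]
    constructor
    · intro heq k hk
      have htake : l.take n = b := by
        have : l.take n = (b ++ (List.replicate d b).flatten).take n := by rw [← hrep, ← heq]
        rw [this, List.take_append_of_le_length (by omega), List.take_of_length_le (by omega)]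
      have hdrop : l.drop n = (List.replicate d b).flatten := by
        have : l.drop n = (b ++ (List.replicate d b).flatten).drop n := by rw [← hrep, ← heq]
        rw [this, List.drop_append_of_le_length (by omega), List.drop_of_length_le (by omega)]
        simp
      cases k with
      | zero => simpa using htake
      | succ j =>
        have hj : j < d := by omega
        have hjd : l.drop ((j + 1) * n) = (l.drop n).drop (j * n) := by
          rw [List.drop_drop]; congr 1; ring
        rw [hjd]
        exact ((ih (l.drop n) b hld hb).mp hdrop) j hj
    · intro hall
      have htake : l.take n = b := by simpa using hall 0 (by omega)
      have hdrop : l.drop n = (List.replicate d b).flatten := by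
        apply (ih (l.drop n) b hld hb).mpr
        intro j hj
        have hjd : l.drop ((j + 1) * n) = (l.drop n).drop (j * n) := by
          rw [List.drop_drop]; congr 1; ring
        have := hall (j + 1) (by omega)
        rw [hjd] at this
        exact this
      calc l = l.take n ++ l.drop n := hsplit
        _ = b ++ (List.replicate d b).flatten := by rw [htake, hdrop]
        _ = (List.replicate (d + 1) b).flatten := hrep.symm

-- ===== VERDICT (by name: the statement is the Claim_ definition above) =====
theorem check_spec : Claim_equal_check := by
  intro text num_parts _ hpre
  unfold Spec_check check check_alt
  have hnp : num_parts ≠ 0 := hpre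
  have hdm : PySem.Int.divmod? (PySem.Str.len text) num_parts
      = some (PySem.Int.floordiv (PySem.Str.len text) num_parts,
              PySem.Int.mod (PySem.Str.len text) num_parts) := by
    simp [PySem.Int.divmod?, PySem.Int.floordiv, PySem.Int.mod, hnp]
  rw [hdm]
  set l := text.toList with hl
  set dv := PySem.Int.floordiv (PySem.Str.len text) num_parts with hdv
  set md := PySem.Int.mod (PySem.Str.len text) num_parts with hmd
  have hLval : PySem.Str.len text = (l.length : Int) := by
    rw [hl]; exact PySem.Str.len_eq text
  have hL0 : 0 ≤ PySem.Str.len text := by rw [hLval]; positivity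
  dsimp only
  by_cases hm : md ≠ 0
  · rw [if_pos hm, if_pos (Or.inl hm)]
  · push_neg at hm
    rw [if_neg (by simpa using hm)]
    have hLdn : dv * num_parts = PySem.Str.len text := by
      have := PySem.Int.floordiv_mul_add_mod (PySem.Str.len text) num_parts
      rw [← hdv, ← hmd] at this; omega
    by_cases hd1 : dv ≤ 1
    · -- B returns True; show A does too
      rw [if_pos (Or.inr hd1)]
      by_cases hd0 : dv ≤ 0
      · -- no parts: set is empty, size 0 ≠ 1
        rw [PySem.List.pyRange_one_eq_nil (by omega)]
        simp
      · -- dv = 1: single part, equal to the whole text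
        have hdv1 : dv = 1 := by omega
        have hLn : PySem.Str.len text = num_parts := by rw [← hLdn, hdv1, one_mul]
        have hnp0 : (0:Int) ≤ num_parts := hLn ▸ hL0
        have hlen' : (l.length : Int) = num_parts := by rw [← hLval, hLn]
        rw [hdv1]
        rw [show PySem.List.pyRange 0 1 1 = [0] from by decide]
        simp only [List.foldl_cons, List.foldl_nil, List.nil_append]
        have hslice : PySem.List.slice l none (some num_parts) = l := by
          rw [PySem.List.slice_to l hnp0,
            show num_parts.toNat = l.length from by omega, List.take_length]
        simp [hslice]
    · -- dv ≥ 2: the real case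
      rw [if_neg (by push_neg; exact ⟨by simpa using hm, by omega⟩ : ¬ (md ≠ 0 ∨ dv ≤ 1))]
      -- num_parts must be positive
      have hnp_pos : 0 < num_parts := by
        rcases lt_trichotomy num_parts 0 with h | h | h
        · exfalso
          have h1 : 0 < dv * (-num_parts) := mul_pos (by omega) (by omega)
          rw [mul_neg] at h1
          linarith
        · exact absurd h hnp
        · exact h
      set n : Nat := num_parts.toNat with hn
      have hnI : (n : Int) = num_parts := Int.toNat_of_nonneg (le_of_lt hnp_pos)
      have hn0 : 0 < n := by omega
      set dd : Nat := dv.toNat with hdd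
      have hddI : (dd : Int) = dv := Int.toNat_of_nonneg (by omega)
      have hdd2 : 2 ≤ dd := by omega
      have hlen : l.length = dd * n := by
        have : (l.length : Int) = (dd : Int) * (n : Int) := by
          rw [hnI, hddI, ← hLval, ← hLdn]
        exact_mod_cast this
      have h2n : 2 * n ≤ dd * n := Nat.mul_le_mul_right n hdd2
      -- the list of parts is a map over range dd
      rw [PySem.List.foldl_append_singleton_eq_map, PySem.List.pyRange_one]
      rw [show (dv - 0).toNat = dd from by omega]
      rw [List.nil_append, List.map_map]
      set b : List Char := l.take n with hb
      have hbl : b.length = n := by rw [hb, List.length_take]; omega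
      have hmapeq : (List.range dd).map
            ((fun i : Int => PySem.List.slice l (some (i * num_parts)) (some (i * num_parts + num_parts))) ∘ (fun k : Nat => 0 + (k : Int)))
          = (List.range dd).map (fun k : Nat => (l.drop (k * n)).take n) := by
        apply List.map_congr_left
        intro k _
        simp only [Function.comp_apply]
        have ha : ((0:Int) + (k:Int)) * num_parts = ((k * n : Nat) : Int) := by
          rw [← hnI]; push_cast; ring
        have hab : ((0:Int) + (k:Int)) * num_parts + num_parts = ((k * n + n : Nat) : Int) := by
          rw [← hnI]; push_cast; ring
        rw [hab, ha, PySem.List.slice_toNat l (by positivity) (by positivity),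
          Int.toNat_natCast, Int.toNat_natCast]
        congr 1
        omega
      rw [hmapeq]
      set parts : List (List Char) := (List.range dd).map (fun k : Nat => (l.drop (k * n)).take n) with hparts
      have hbmem : b ∈ parts := by
        rw [hparts]
        refine List.mem_map.mpr ⟨0, List.mem_range.mpr (by omega), ?_⟩
        simp [hb]
      -- parts[0] = b ≠ l (length n vs dd*n with dd ≥ 2)
      have hp0 : PySem.List.pyGetD parts 0 [] = b := by
        obtain ⟨m, hm⟩ : ∃ m, dd = m + 1 := ⟨dd - 1, by omega⟩
        rw [hparts, hm, List.range_succ_eq_map]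
        simp [PySem.List.pyGetD, PySem.List.pyIdx?, PySem.List.pyGet?, hb]
      have hbne : b ≠ l := by
        intro h
        have hlb := congrArg List.length h
        rw [hbl, hlen] at hlb
        have h2 : 2 * n ≤ dd * n := Nat.mul_le_mul_right n hdd2
        omega
      rw [hp0]
      -- main equivalence: set-size ≠ 1  ↔  l = first block repeated
      have hset : (PySem.Set.ofList parts).length = 1 ↔ l = (List.replicate dd b).flatten := by
        rw [setlen_one_iff parts b hbmem, chunks_rep n hn0 dd l b hlen hbl]
        constructor
        · intro h k hk
          exact h _ (List.mem_map.mpr ⟨k, List.mem_range.mpr hk, rfl⟩)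
        · intro h x hx
          obtain ⟨k, hk, rfl⟩ := List.mem_map.mp hx
          exact h k (List.mem_range.mp hk)
      -- B's block is the same b
      have hbslice : PySem.List.slice l none (some num_parts) = b := by
        rw [PySem.List.slice_to l (le_of_lt hnp_pos), hb, hn]
      rw [hbslice]
      by_cases hrep : l = (List.replicate dd b).flatten
      · have hbf : b ≠ (List.replicate dd b).flatten := by rw [← hrep]; exact hbne
        simp [hset.mpr hrep, hrep, hbf]
      · have hne1 : (PySem.Set.ofList parts).length ≠ 1 := fun h => hrep (hset.mp h)
        simp [hne1, hrep]
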